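-- pv_equiv track=rewrite | github.com/anothersidewalklgbt/botsxa | test_camoufox.py | make_unique_username
-- ===== SOURCE A (Python) =====
-- def make_unique_username(desired, existing_set):
--     if desired not in existing_set:
--         return desired
--     i = 1
--     while True:
--         candidate = f"{desired}_{i}"
--         if candidate not in existing_set:
--             return candidate
--         i += 1
-- ===== SOURCE B (Python) =====
-- def make_unique_username(desired, existing_set):
--     if desired not in existing_set:
--         return desired
--     prefix = desired + "_"
--     used = set()
--     for s in existing_set:
--         if s.startswith(prefix):
--             r = s[len(prefix):]
--             if r.isdigit() and r[0] != '0':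
--                 v = 0
--                 for c in r:
--                     v = 10 * v + (ord(c) - 48)
--                 used.add(v)
--     m = 1
--     while m in used:
--         m += 1
--     return f"{desired}_{m}"
-- ===== Notes on version B (the rewrite author's own statement) =====
-- stated objective: alternative
-- what changed: Replaced A's candidate-probing loop (membership-test f'{desired}_{i}' against the whole list for i=1,2,...) by a single pass over existing_set that parses each canonical numeric suffix of desired into a set of used integers, followed by a smallest-missing-positive-integer search over that set.
import Mathlib
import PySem

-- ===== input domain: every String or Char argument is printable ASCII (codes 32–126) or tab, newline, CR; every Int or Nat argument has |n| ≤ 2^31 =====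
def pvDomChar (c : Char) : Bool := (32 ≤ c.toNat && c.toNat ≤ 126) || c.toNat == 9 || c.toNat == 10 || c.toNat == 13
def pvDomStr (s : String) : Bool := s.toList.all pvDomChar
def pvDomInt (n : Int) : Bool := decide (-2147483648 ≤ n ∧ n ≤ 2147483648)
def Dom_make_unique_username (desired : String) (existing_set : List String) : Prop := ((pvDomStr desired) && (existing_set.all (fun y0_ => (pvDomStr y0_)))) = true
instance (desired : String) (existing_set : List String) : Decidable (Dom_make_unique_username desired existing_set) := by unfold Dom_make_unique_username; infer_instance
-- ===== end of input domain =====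

-- B replaces A's repeated probe-the-whole-list loop by one suffix-parsing pass building the set
-- of used numeric suffixes, then a smallest-missing-positive search (objective: alternative).

-- ===== PORT A =====
-- f"{desired}_{i}"
def pvCand (desired : String) (i : Int) : String :=
  String.ofList (desired.toList ++ '_' :: PySem.Int.toChars i)

-- A's 'while True' probing loop; fuel existing_set.length + 1 is enough to reach the first free
-- candidate (the candidates for distinct i are distinct strings), so the fuel-0 default is never hit.
def pvALoop (desired : String) (existing_set : List String) : Nat → Int → String
  | 0, i => pvCand desired i
  | fuel + 1, i =>
      let candidate := pvCand desired i
      if candidate ∈ existing_set then pvALoop desired existing_set fuel (i + 1)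
      else candidate

def make_unique_username (desired : String) (existing_set : List String) : String :=
  if desired ∉ existing_set then desired
  else pvALoop desired existing_set (existing_set.length + 1) 1

-- ===== PORT B =====
-- v = 0; for c in r: v = 10 * v + (ord(c) - 48)
def pvIntVal (r : List Char) : Int :=
  r.foldl (fun v c => 10 * v + ((c.toNat : Int) - 48)) 0

-- body of B's pass: parse one element's suffix into the used-set
def pvStep (p : List Char) (u : PySem.Set Int) (s : String) : PySem.Set Int :=
  if PySem.Chars.startswith s.toList p then
    let r := PySem.List.slice s.toList (some (p.length : Int)) none
    if PySem.Chars.strIsdigit r then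
      match PySem.List.pyGet? r 0 with
      | some c => if c ≠ '0' then PySem.Set.add u (pvIntVal r) else u
      | none => u
    else u
  else u

def pvUsed (desired : String) (existing_set : List String) : PySem.Set Int :=
  existing_set.foldl (pvStep (desired.toList ++ ['_'])) PySem.Set.empty

-- B's 'while m in used: m += 1'; fuel existing_set.length + 1 is enough (|used| ≤ length).
def pvBLoop (desired : String) (used : PySem.Set Int) : Nat → Int → String
  | 0, m => pvCand desired m
  | fuel + 1, m =>
      if m ∈ used then pvBLoop desired used fuel (m + 1)
      else pvCand desired m

def make_unique_username_alt (desired : String) (existing_set : List String) : String :=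
  if desired ∉ existing_set then desired
  else pvBLoop desired (pvUsed desired existing_set) (existing_set.length + 1) 1

-- ===== PRECONDITION & SPEC =====
def Spec_make_unique_username (desired : String) (existing_set : List String) (out : String) : Prop := out = make_unique_username_alt desired existing_set
instance (desired : String) (existing_set : List String) (out : String) : Decidable (Spec_make_unique_username desired existing_set out) := by unfold Spec_make_unique_username; infer_instance

-- ===== CLAIM (what is proved, stated in full; the proofs are below) =====
def Claim_equal_make_unique_username : Prop := ∀ (desired : String) (existing_set : List String), Dom_make_unique_username desired existing_set → Spec_make_unique_username desired existing_set (make_unique_username desired existing_set)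

-- ===== LEMMAS AND PROOFS =====

-- canonical decimal digit string of n (big-endian), for proofs
def pvChars (n : Nat) : List Char := ((Nat.digits 10 n).map Nat.digitChar).reverse

-- value of a big-endian digit string, for proofs
def pvVal (cs : List Char) : Nat := Nat.ofDigits 10 (cs.reverse.map (fun c => c.toNat - 48))

-- acceptance condition of pvStep, as a proposition
def pvAcc (p : List Char) (s : String) (m : Int) : Prop :=
  ∃ r, s.toList = p ++ r ∧ PySem.Chars.strIsdigit r = true ∧ r.head? ≠ some '0' ∧ pvIntVal r = m

theorem pv_char_toNat_inj {a b : Char} (h : a.toNat = b.toNat) : a = b := by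
  rw [← Char.ofNat_toNat a, ← Char.ofNat_toNat b, h]

theorem pv_digitChar_toNat {d : Nat} (h : d < 10) : (Nat.digitChar d).toNat = 48 + d := by
  interval_cases d <;> decide

theorem pv_isdigit_iff (c : Char) :
    PySem.Chars.isdigit c = true ↔ 48 ≤ c.toNat ∧ c.toNat ≤ 57 := by
  unfold PySem.Chars.isdigit
  rw [Bool.and_eq_true, decide_eq_true_iff, decide_eq_true_iff,
    Char.le_def, Char.le_def, UInt32.le_iff_toNat_le, UInt32.le_iff_toNat_le]
  exact Iff.rfl

theorem pv_digitChar_inv {c : Char} (h1 : 48 ≤ c.toNat) (h2 : c.toNat ≤ 57) :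
    Nat.digitChar (c.toNat - 48) = c := by
  apply pv_char_toNat_inj
  rw [pv_digitChar_toNat (by omega)]
  omega

theorem pv_toDigitsCore_eq (fuel : Nat) : ∀ (n : Nat) (ds : List Char), n ≠ 0 → n < fuel →
    Nat.toDigitsCore 10 fuel n ds = pvChars n ++ ds := by
  induction fuel with
  | zero => intro n ds hn hf; omega
  | succ f ih =>
    intro n ds hn hf
    have hstep : Nat.toDigitsCore 10 (f + 1) n ds =
        (if n / 10 = 0 then (n % 10).digitChar :: ds
         else Nat.toDigitsCore 10 f (n / 10) ((n % 10).digitChar :: ds)) := by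
      simp [Nat.toDigitsCore]
    have hdig : Nat.digits 10 n = n % 10 :: Nat.digits 10 (n / 10) :=
      Nat.digits_def' (by norm_num) (Nat.pos_of_ne_zero hn)
    rw [hstep]
    by_cases h0 : n / 10 = 0
    · rw [if_pos h0]
      unfold pvChars
      rw [hdig, h0]
      simp
    · rw [if_neg h0]
      have hlt : n / 10 < n := Nat.div_lt_self (Nat.pos_of_ne_zero hn) (by norm_num)
      rw [ih (n / 10) _ h0 (by omega)]
      unfold pvChars
      rw [hdig]
      simp

theorem pv_toChars_eq (m : Int) (hm : 1 ≤ m) : PySem.Int.toChars m = pvChars m.toNat := by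
  have h1 : ¬ m < 0 := by omega
  have h2 : m.toNat ≠ 0 := by omega
  simp only [PySem.Int.toChars, if_neg h1, Nat.toDigits]
  rw [pv_toDigitsCore_eq _ _ _ h2 (by omega)]
  simp

theorem pv_intVal_append (l : List Char) (c : Char) :
    pvIntVal (l ++ [c]) = 10 * pvIntVal l + ((c.toNat : Int) - 48) := by
  simp [pvIntVal, List.foldl_append]

theorem pv_val_append (l : List Char) (c : Char) :
    pvVal (l ++ [c]) = 10 * pvVal l + (c.toNat - 48) := by
  simp [pvVal, Nat.ofDigits_cons]
  omega

theorem pv_intVal_eq (cs : List Char) (h : ∀ c ∈ cs, 48 ≤ c.toNat) :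
    pvIntVal cs = (pvVal cs : Int) := by
  induction cs using List.reverseRecOn with
  | nil => simp [pvIntVal, pvVal]
  | append_singleton l c ih =>
    have hc : 48 ≤ c.toNat := h c (by simp)
    rw [pv_intVal_append, pv_val_append, ih (fun x hx => h x (by simp [hx]))]
    push_cast [Nat.cast_sub hc]
    ring

theorem pv_val_chars (n : Nat) : pvVal (pvChars n) = n := by
  unfold pvVal pvChars
  rw [List.reverse_reverse, List.map_map]
  have hmap : (Nat.digits 10 n).map ((fun c => c.toNat - 48) ∘ Nat.digitChar) =
      (Nat.digits 10 n).map id := by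
    apply List.map_congr_left
    intro d hd
    have := pv_digitChar_toNat (Nat.digits_lt_base (by norm_num) hd)
    simp [this]
  rw [hmap, List.map_id]
  exact Nat.ofDigits_digits 10 n

theorem pv_chars_digits {n : Nat} {c : Char} (h : c ∈ pvChars n) :
    48 ≤ c.toNat ∧ c.toNat ≤ 57 := by
  unfold pvChars at h
  rw [List.mem_reverse, List.mem_map] at h
  obtain ⟨d, hd, rfl⟩ := h
  have hlt := Nat.digits_lt_base (by norm_num) hd
  rw [pv_digitChar_toNat hlt]
  omega

theorem pv_chars_ne_nil {n : Nat} (h : n ≠ 0) : pvChars n ≠ [] := by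
  unfold pvChars
  simp [Nat.digits_ne_nil_iff_ne_zero, h]

theorem pv_chars_head {n : Nat} (h : n ≠ 0) : (pvChars n).head? ≠ some '0' := by
  unfold pvChars
  rw [List.head?_reverse]
  have hne : Nat.digits 10 n ≠ [] := Nat.digits_ne_nil_iff_ne_zero.mpr h
  obtain ⟨l2, x, hx⟩ := (Nat.digits 10 n).eq_nil_or_concat.resolve_left hne
  have hxmem : x ∈ Nat.digits 10 n := by rw [hx]; simp
  have hxlt : x < 10 := Nat.digits_lt_base (by norm_num) hxmem
  have hgl : (Nat.digits 10 n).getLast? = some ((Nat.digits 10 n).getLast hne) :=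
    List.getLast?_eq_some_getLast hne
  have hglx : (Nat.digits 10 n).getLast? = some x := by
    rw [hx]; simp
  have hxne : x ≠ 0 := by
    have hz := Nat.getLast_digit_ne_zero 10 h
    rw [hgl] at hglx
    rw [← Option.some_inj.mp hglx]
    exact hz
  rw [hx]
  simp only [List.concat_eq_append, List.map_append, List.map_cons, List.map_nil,
    List.getLast?_concat]
  intro hcon
  have hto := congrArg Char.toNat (Option.some_inj.mp hcon)
  rw [pv_digitChar_toNat hxlt] at hto
  have h0 : ('0' : Char).toNat = 48 := by decide
  omega

theorem pv_chars_val (cs : List Char) (hne : cs ≠ [])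
    (hd : ∀ c ∈ cs, 48 ≤ c.toNat ∧ c.toNat ≤ 57) (h0 : cs.head? ≠ some '0') :
    pvChars (pvVal cs) = cs ∧ pvVal cs ≠ 0 := by
  obtain ⟨c, t, rfl⟩ := List.exists_cons_of_ne_nil hne
  have hclt : ∀ x ∈ (c :: t).reverse.map (fun c => c.toNat - 48), x < 10 := by
    intro x hx
    rw [List.mem_map] at hx
    obtain ⟨y, hy, rfl⟩ := hx
    have := hd y (List.mem_reverse.mp hy)
    omega
  have hlastne : ∀ (hh : (c :: t).reverse.map (fun c => c.toNat - 48) ≠ []),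
      ((c :: t).reverse.map (fun c => c.toNat - 48)).getLast hh ≠ 0 := by
    intro hh
    have h' : ((c :: t).reverse.map (fun c => c.toNat - 48)).getLast? = some (c.toNat - 48) := by
      simp
    have hb : ((c :: t).reverse.map (fun c => c.toNat - 48)).getLast? =
        some (((c :: t).reverse.map (fun c => c.toNat - 48)).getLast hh) :=
      List.getLast?_eq_some_getLast hh
    rw [hb] at h'
    rw [Option.some_inj.mp h']
    have hcd := hd c (by simp)
    intro hcon
    have hc48 : c.toNat = 48 := by omega
    have hceq : c = '0' := pv_char_toNat_inj (by rw [hc48]; decide)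
    simp [hceq] at h0
  have hdg : Nat.digits 10 (pvVal (c :: t)) = (c :: t).reverse.map (fun c => c.toNat - 48) :=
    Nat.digits_ofDigits 10 (by norm_num) _ hclt hlastne
  constructor
  · unfold pvChars
    rw [hdg, List.map_map]
    have h1 : ∀ x ∈ (c :: t).reverse, (Nat.digitChar ∘ fun c => c.toNat - 48) x = id x := by
      intro x hx
      have := hd x (List.mem_reverse.mp hx)
      simp [Function.comp, pv_digitChar_inv this.1 this.2]
    rw [List.map_congr_left h1, List.map_id, List.reverse_reverse]
  · intro hz
    rw [hz] at hdg
    simp at hdg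

theorem pv_acc_iff (d : String) (s : String) (m : Int) (hm : 1 ≤ m) :
    pvAcc (d.toList ++ ['_']) s m ↔ s = pvCand d m := by
  constructor
  · rintro ⟨r, hs, hdig, h0, hval⟩
    rw [PySem.Chars.strIsdigit, Bool.and_eq_true] at hdig
    have hne : r ≠ [] := by
      intro hr; rw [hr] at hdig; simp at hdig
    have hall : ∀ c ∈ r, 48 ≤ c.toNat ∧ c.toNat ≤ 57 := by
      intro c hc
      exact (pv_isdigit_iff c).mp (by
        have := hdig.2
        rw [List.all_eq_true] at this
        exact this c hc)
    obtain ⟨hcanon, hnz⟩ := pv_chars_val r hne hall h0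
    have hiv : pvIntVal r = (pvVal r : Int) := pv_intVal_eq r (fun c hc => (hall c hc).1)
    have hmv : m = (pvVal r : Int) := by omega
    have htc : PySem.Int.toChars m = r := by
      rw [pv_toChars_eq m hm, hmv]
      simpa using hcanon
    have hsol : String.ofList s.toList = s := String.ofList_toList
    rw [← hsol, hs, ← htc]
    unfold pvCand
    simp
  · rintro rfl
    have h2 : m.toNat ≠ 0 := by omega
    refine ⟨PySem.Int.toChars m, ?_, ?_, ?_, ?_⟩
    · unfold pvCand
      simp
    · rw [PySem.Chars.strIsdigit, Bool.and_eq_true]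
      constructor
      · rw [pv_toChars_eq m hm]
        simp [pv_chars_ne_nil h2]
      · rw [List.all_eq_true]
        intro c hc
        rw [pv_toChars_eq m hm] at hc
        exact (pv_isdigit_iff c).mpr (pv_chars_digits hc)
    · rw [pv_toChars_eq m hm]
      exact pv_chars_head h2
    · rw [pv_toChars_eq m hm,
        pv_intVal_eq _ (fun c hc => (pv_chars_digits hc).1), pv_val_chars]
      omega

theorem pv_acc_fixed {p r : List Char} {s : String} (hr : s.toList = p ++ r) (m : Int) :
    pvAcc p s m ↔ (PySem.Chars.strIsdigit r = true ∧ r.head? ≠ some '0' ∧ pvIntVal r = m) := by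
  constructor
  · rintro ⟨r', hs', h1, h2, h3⟩
    have : r' = r := (List.append_cancel_left (hr.symm.trans hs')).symm
    subst this
    exact ⟨h1, h2, h3⟩
  · rintro ⟨h1, h2, h3⟩
    exact ⟨r, hr, h1, h2, h3⟩

theorem pv_step_mem (p : List Char) (u : PySem.Set Int) (s : String) (m : Int) :
    m ∈ pvStep p u s ↔ m ∈ u ∨ pvAcc p s m := by
  unfold pvStep
  by_cases h1 : PySem.Chars.startswith s.toList p
  · rw [if_pos h1]
    obtain ⟨r, hr⟩ := (PySem.Chars.startswith_iff _ _).mp h1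
    have hr' : s.toList = p ++ r := hr.symm
    have hslice : PySem.List.slice s.toList (some ((p.length : Nat) : Int)) none = r := by
      rw [PySem.List.slice_from_natCast, hr', List.drop_left]
    simp only [hslice, pv_acc_fixed hr' m]
    by_cases h2 : PySem.Chars.strIsdigit r
    · rw [if_pos h2]
      have hne : r ≠ [] := by
        rw [PySem.Chars.strIsdigit, Bool.and_eq_true] at h2
        intro hnil; rw [hnil] at h2; simp at h2
      obtain ⟨c, t, rfl⟩ := List.exists_cons_of_ne_nil hne
      rw [PySem.List.pyGet?_zero_cons]
      by_cases h3 : c = '0'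
      · subst h3
        simp [h2]
      · simp [h2, h3, PySem.Set.mem_add, eq_comm]
    · rw [if_neg h2]
      simp [h2]
  · rw [if_neg h1]
    constructor
    · exact Or.inl
    · rintro (hu | ⟨r, hs', _, _, _⟩)
      · exact hu
      · exact absurd ((PySem.Chars.startswith_iff _ _).mpr ⟨r, hs'.symm⟩) h1

theorem pv_foldl_mem (p : List Char) (es : List String) : ∀ (u : PySem.Set Int) (m : Int),
    m ∈ es.foldl (pvStep p) u ↔ m ∈ u ∨ ∃ s ∈ es, pvAcc p s m := by
  induction es with
  | nil => intro u m; simp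
  | cons s t ih =>
    intro u m
    rw [List.foldl_cons, ih, pv_step_mem]
    simp only [List.mem_cons]
    constructor
    · rintro ((hu | ha) | ⟨x, hx, hax⟩)
      · exact Or.inl hu
      · exact Or.inr ⟨s, Or.inl rfl, ha⟩
      · exact Or.inr ⟨x, Or.inr hx, hax⟩
    · rintro (hu | ⟨x, (rfl | hx), hax⟩)
      · exact Or.inl (Or.inl hu)
      · exact Or.inl (Or.inr hax)
      · exact Or.inr ⟨x, hx, hax⟩

theorem pv_used_iff (d : String) (es : List String) (m : Int) (hm : 1 ≤ m) :
    m ∈ pvUsed d es ↔ pvCand d m ∈ es := by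
  unfold pvUsed
  rw [pv_foldl_mem]
  have hempty : m ∉ PySem.Set.empty := by simp [PySem.Set.empty]
  constructor
  · rintro (he | ⟨s, hs, hacc⟩)
    · exact absurd he hempty
    · rwa [(pv_acc_iff d s m hm).mp hacc] at hs
  · intro h
    exact Or.inr ⟨pvCand d m, h, (pv_acc_iff d (pvCand d m) m hm).mpr rfl⟩

theorem pv_loop_eq (d : String) (es : List String) (fuel : Nat) :
    ∀ i : Int, 1 ≤ i → pvALoop d es fuel i = pvBLoop d (pvUsed d es) fuel i := by
  induction fuel with
  | zero => intro i _; rfl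
  | succ f ih =>
    intro i hi
    show (if pvCand d i ∈ es then pvALoop d es f (i + 1) else pvCand d i) =
      (if i ∈ pvUsed d es then pvBLoop d (pvUsed d es) f (i + 1) else pvCand d i)
    by_cases h : pvCand d i ∈ es
    · rw [if_pos h, if_pos ((pv_used_iff d es i hi).mpr h), ih (i + 1) (by omega)]
    · rw [if_neg h, if_neg (fun hc => h ((pv_used_iff d es i hi).mp hc))]

-- ===== VERDICT (by name: the statement is the Claim_ definition above) =====
theorem make_unique_username_spec : Claim_equal_make_unique_username := by
  intro d es _
  unfold Spec_make_unique_username make_unique_username make_unique_username_alt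
  by_cases h : d ∈ es
  · simp only [h, not_true_eq_false, if_false]
    exact pv_loop_eq d es (es.length + 1) 1 (by norm_num)
  · simp [h]
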